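-- pv_equiv track=rewrite | github.com/AllegroVivo/CMServiceAccountReconciler | Utilities/Utilities.py | split_multi_names
-- ===== SOURCE A (Python) =====
-- from typing import TYPE_CHECKING, Any, List, Optional, Sequence, Union, Tuple, Dict
--
-- def split_multi_names(raw: str) -> List[Tuple[str, Optional[str], str]]:
--     """
--      Returns a list of tuples containing (first_name, last_name, raw)
--     """
--
--     parts = raw.strip().split()
--     if not parts:
--         return []
--
--     member_names: List[Tuple[str, Optional[str], str]] = []
--     current_name_parts: List[str] = []
--     last_name = parts[-1]
--
--     for part in parts[:-1]:
--         if part.lower() in ("and", "&"):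
--             if current_name_parts:
--                 if len(current_name_parts) == 2:
--                     first_name = current_name_parts[0]
--                     last_name = current_name_parts[1]
--                 else:
--                     first_name = " ".join(current_name_parts).strip()
--                 member_names.append((first_name, last_name, raw))
--                 current_name_parts = []
--         else:
--             current_name_parts.append(part)
--
--     if current_name_parts:
--         first_name = " ".join(current_name_parts).strip()
--         member_names.append((first_name, last_name, raw))
--
--     return member_names
-- ===== SOURCE B (Python) =====
-- def _is_sep(t):
--     return t.lower() in ("and", "&")
--
-- def split_multi_names(raw):
--     tokens = raw.strip().split()
--     if not tokens:
--         return []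
--     body, last = tokens[:-1], tokens[-1]
--     out = []
--     i, n = 0, len(body)
--     while i < n:
--         if _is_sep(body[i]):
--             i += 1
--             continue
--         j = i
--         while j < n and not _is_sep(body[j]):
--             j += 1
--         group = body[i:j]
--         if j == n:
--             out.append((" ".join(group).strip(), last, raw))
--         elif len(group) == 2:
--             first, last = group
--             out.append((first, last, raw))
--         else:
--             out.append((" ".join(group).strip(), last, raw))
--         i = j + 1
--     return out
-- ===== Notes on version B (the rewrite author's own statement) =====
-- stated objective: alternative
-- what changed: A builds names in a single pass that accumulates tokens in a current_name_parts list and flushes it at each separator plus once after the loop; B instead walks the token list group-at-a-time with an index scan (skip separators, take the whole next group by scanning to the next separator, emit its tuple immediately, distinguishing the trailing group inline), so no accumulator list or post-loop flush exists.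
import Mathlib
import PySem

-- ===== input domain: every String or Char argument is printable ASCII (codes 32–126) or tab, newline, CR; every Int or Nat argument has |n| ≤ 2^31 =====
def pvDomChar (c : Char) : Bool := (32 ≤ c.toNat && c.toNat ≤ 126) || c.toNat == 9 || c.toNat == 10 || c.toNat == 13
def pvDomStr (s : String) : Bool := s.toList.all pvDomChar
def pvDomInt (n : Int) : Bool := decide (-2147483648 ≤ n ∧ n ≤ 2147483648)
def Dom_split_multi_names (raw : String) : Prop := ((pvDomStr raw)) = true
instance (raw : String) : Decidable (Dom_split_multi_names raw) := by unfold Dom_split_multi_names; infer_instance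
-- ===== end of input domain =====

-- B replaces A's single pass with an accumulator list by a group-at-a-time scan
-- (skip separators, extract the next whole group, emit its tuple); objective: alternative decomposition, same cost.

-- ===== PORT A =====
-- A's fold step: state = (member_names, current_name_parts, last_name)
def pvStepA (raw : String)
    (st : List (String × Option String × String) × List String × String) (part : String) :
    List (String × Option String × String) × List String × String :=
  let (mns, cur, last) := st
  if PySem.Str.lower part == "and" || PySem.Str.lower part == "&" then
    if cur ≠ [] then
      if cur.length = 2 then
        (mns ++ [(PySem.List.pyGetD cur 0 "", some (PySem.List.pyGetD cur 1 ""), raw)], [],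
          PySem.List.pyGetD cur 1 "")
      else
        (mns ++ [(PySem.Str.strip (PySem.Str.join " " cur), some last, raw)], [], last)
    else st
  else (mns, cur ++ [part], last)

def split_multi_names (raw : String) : List (String × Option String × String) :=
  let parts := PySem.Str.split₀ (PySem.Str.strip raw)
  if parts = [] then []
  else
    let st := (PySem.List.slice parts none (some (-1))).foldl (pvStepA raw)
      ([], [], PySem.List.pyGetD parts (-1) "")
    if st.2.1 ≠ [] then
      st.1 ++ [(PySem.Str.strip (PySem.Str.join " " st.2.1), some st.2.2, raw)]
    else st.1

-- ===== PORT B =====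
def pvIsSep (t : String) : Bool :=
  PySem.Str.lower t == "and" || PySem.Str.lower t == "&"

-- B's outer while loop: skip a separator, or take the next whole group and emit its tuple.
def pvBuild (raw : String) (body : List String) (last : String) :
    List (String × Option String × String) :=
  match body with
  | [] => []
  | p :: ps =>
    if pvIsSep p then pvBuild raw ps last
    else
      let g := p :: ps.takeWhile (fun q => !pvIsSep q)
      let rest := ps.dropWhile (fun q => !pvIsSep q)
      if rest.isEmpty then [(PySem.Str.strip (PySem.Str.join " " g), some last, raw)]
      else if g.length = 2 then
        (PySem.List.pyGetD g 0 "", some (PySem.List.pyGetD g 1 ""), raw) ::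
          pvBuild raw rest.tail (PySem.List.pyGetD g 1 "")
      else
        (PySem.Str.strip (PySem.Str.join " " g), some last, raw) :: pvBuild raw rest.tail last
termination_by body.length
decreasing_by
  all_goals
    have h1 := List.length_dropWhile_le (fun q => !pvIsSep q) ps
    simp [List.length_tail]
    try omega

def split_multi_names_alt (raw : String) : List (String × Option String × String) :=
  let tokens := PySem.Str.split₀ (PySem.Str.strip raw)
  if tokens = [] then []
  else
    pvBuild raw (PySem.List.slice tokens none (some (-1))) (PySem.List.pyGetD tokens (-1) "")

-- ===== PRECONDITION & SPEC =====
def Spec_split_multi_names (raw : String) (out : List (String × Option String × String)) : Prop := out = split_multi_names_alt raw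
instance (raw : String) (out : List (String × Option String × String)) : Decidable (Spec_split_multi_names raw out) := by unfold Spec_split_multi_names; infer_instance

-- ===== CLAIM (what is proved, stated in full; the proofs are below) =====
def Claim_equal_split_multi_names : Prop := ∀ (raw : String), Dom_split_multi_names raw → Spec_split_multi_names raw (split_multi_names raw)

-- ===== LEMMAS AND PROOFS =====

-- A's post-loop flush, as a function of the final state.
def pvFinishA (raw : String) (st : List (String × Option String × String) × List String × String) :
    List (String × Option String × String) :=
  if st.2.1 ≠ [] then
    st.1 ++ [(PySem.Str.strip (PySem.Str.join " " st.2.1), some st.2.2, raw)]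
  else st.1

theorem pvMain (raw : String) (body : List String) :
    ∀ (cur : List String) (mns : List (String × Option String × String)) (last : String),
      (∀ x ∈ cur, pvIsSep x = false) →
      pvFinishA raw (body.foldl (pvStepA raw) (mns, cur, last)) =
        mns ++ pvBuild raw (cur ++ body) last := by
  induction body with
  | nil =>
    intro cur mns last hcur
    match cur with
    | [] => simp [pvFinishA, pvBuild]
    | c :: cs =>
      have hc : pvIsSep c = false := hcur c (by simp)
      have hcs : ∀ x ∈ cs, pvIsSep x = false := fun x hx => hcur x (by simp [hx])
      have h1 : cs.takeWhile (fun q => !pvIsSep q) = cs :=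
        List.takeWhile_eq_self_iff.mpr (fun x hx => by simp [hcs x hx])
      have hdw : cs.dropWhile (fun q => !pvIsSep q) = [] :=
        List.dropWhile_eq_nil_iff.mpr (fun x hx => by simp [hcs x hx])
      simp [pvFinishA, pvBuild, hc, h1, hdw]
  | cons p ps ih =>
    intro cur mns last hcur
    rw [List.foldl_cons]
    by_cases hp : pvIsSep p = true
    · -- p is a separator
      have hp' : (PySem.Str.lower p == "and" || PySem.Str.lower p == "&") = true := hp
      match cur with
      | [] =>
        have hstep : pvStepA raw (mns, [], last) p = (mns, [], last) := by
          simp [pvStepA, hp']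
        rw [hstep, ih [] mns last (by simp)]
        conv_rhs => rw [List.nil_append, pvBuild]
        simp [hp]
      | c :: cs =>
        have hc : pvIsSep c = false := hcur c (by simp)
        have hcs : ∀ x ∈ cs, pvIsSep x = false := fun x hx => hcur x (by simp [hx])
        have h1 : cs.takeWhile (fun q => !pvIsSep q) = cs :=
          List.takeWhile_eq_self_iff.mpr (fun x hx => by simp [hcs x hx])
        have h2 : cs.dropWhile (fun q => !pvIsSep q) = [] :=
          List.dropWhile_eq_nil_iff.mpr (fun x hx => by simp [hcs x hx])
        have htk : (cs ++ p :: ps).takeWhile (fun q => !pvIsSep q) = cs := by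
          simp [List.takeWhile_append, h1, hp]
        have hdw : (cs ++ p :: ps).dropWhile (fun q => !pvIsSep q) = p :: ps := by
          simp [List.dropWhile_append, h2, hp]
        by_cases h2len : (c :: cs).length = 2
        · have hstep : pvStepA raw (mns, c :: cs, last) p =
              (mns ++ [(PySem.List.pyGetD (c :: cs) 0 "", some (PySem.List.pyGetD (c :: cs) 1 ""), raw)],
                [], PySem.List.pyGetD (c :: cs) 1 "") := by
            simp [pvStepA, hp', h2len]
          have h2len' : cs.length = 1 := by simpa using h2len
          rw [hstep, ih [] _ _ (by simp)]
          conv_rhs => rw [List.cons_append, pvBuild]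
          simp [hc, htk, hdw, h2len']
        · have h2len' : ¬ cs.length = 1 := by simpa using h2len
          have hstep : pvStepA raw (mns, c :: cs, last) p =
              (mns ++ [(PySem.Str.strip (PySem.Str.join " " (c :: cs)), some last, raw)], [], last) := by
            simp [pvStepA, hp', h2len']
          rw [hstep, ih [] _ _ (by simp)]
          conv_rhs => rw [List.cons_append, pvBuild]
          simp [hc, htk, hdw, h2len']
    · -- p is not a separator
      have hp' : (PySem.Str.lower p == "and" || PySem.Str.lower p == "&") = false := by
        simpa [pvIsSep] using hp
      have hstep : pvStepA raw (mns, cur, last) p = (mns, cur ++ [p], last) := by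
        simp [pvStepA, hp']
      rw [hstep, ih (cur ++ [p]) mns last (by
        intro x hx
        rcases List.mem_append.mp hx with h | h
        · exact hcur x h
        · simp at h; subst h; simpa [pvIsSep] using hp')]
      rw [List.append_assoc]
      rfl

-- ===== VERDICT (by name: the statement is the Claim_ definition above) =====
theorem split_multi_names_spec : Claim_equal_split_multi_names := by
  intro raw _
  unfold Spec_split_multi_names split_multi_names split_multi_names_alt
  by_cases h : PySem.Str.split₀ (PySem.Str.strip raw) = []
  · simp [h]
  · simp only [if_neg h]
    have := pvMain raw (PySem.List.slice (PySem.Str.split₀ (PySem.Str.strip raw)) none (some (-1)))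
      [] [] (PySem.List.pyGetD (PySem.Str.split₀ (PySem.Str.strip raw)) (-1) "") (by simp)
    simpa [pvFinishA] using this
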